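-- pv_equiv track=rewrite | github.com/vo-andrew/interview-prep | epi/5.1.1.py | solution
-- ===== SOURCE A (Python) =====
-- def solution(A):
--     """
--     The main intuition behind this approach is that we first do a linear pass of the array to track what are the three possible values of the keys. We then instantiate three arrays which will hold the distinct three elements we encounter. In the second pass, we reorder the elements of the array such that similar keys are grouped together by appending them to their respective array. At the end, we return the three arrays concatenated together.
--     """
--     if not A:
--         return A
--     pos = 0
--     seen = list()
--     for elem in A:
--         if elem not in seen:
--             seen.append(elem)
--     first = list()
--     second = list()
--     third = list()
--     for elem in A:
--         if elem == seen[0]: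
--             first.append(elem)
--         elif elem == seen[1]:
--             second.append(elem)
--         else:
--             third.append(elem)
--     first += second
--     first += third
--     return first
-- ===== SOURCE B (Python) =====
-- def solution(A):
--     if not A:
--         return A
--     k1 = A[0]
--     k2 = next((x for x in A if x != k1), None)
--     if k2 is None:
--         return list(A)
--     return ([x for x in A if x == k1]
--             + [x for x in A if x == k2]
--             + [x for x in A if x != k1 and x != k2])
-- ===== Notes on version B (the rewrite author's own statement) =====
-- stated objective: faster
-- what changed: Instead of building the full distinct-values list with a membership scan per element (O(n*d)), B takes the first element as the first key and finds the second key with one short scan, then produces the result as three filter passes; no dedup list and no per-element membership scan.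
import Mathlib
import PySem

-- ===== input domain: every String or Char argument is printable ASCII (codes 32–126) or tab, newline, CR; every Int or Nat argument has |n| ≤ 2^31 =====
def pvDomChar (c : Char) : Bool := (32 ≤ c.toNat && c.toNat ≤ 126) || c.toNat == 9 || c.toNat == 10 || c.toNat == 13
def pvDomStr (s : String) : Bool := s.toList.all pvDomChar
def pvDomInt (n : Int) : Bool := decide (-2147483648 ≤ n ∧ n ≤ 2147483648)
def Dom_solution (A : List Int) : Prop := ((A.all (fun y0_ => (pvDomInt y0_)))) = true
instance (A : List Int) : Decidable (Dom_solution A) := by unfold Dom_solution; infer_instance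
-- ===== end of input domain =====

-- B replaces A's dedup list (a membership scan per element) by one scan for the first
-- two distinct keys followed by three filter passes; same return value, O(n) instead of O(n*d).

-- ===== PORT A =====
-- the step of A's second loop; seen0/seen1 are seen[0] and seen[1] as options
-- (Python's seen[1] is evaluated only in the elif branch, where it always exists).
def solStep (seen0 seen1 : Option Int) (acc : List Int × List Int × List Int) (e : Int) :
    List Int × List Int × List Int :=
  if seen0 = some e then (acc.1 ++ [e], acc.2.1, acc.2.2)
  else if seen1 = some e then (acc.1, acc.2.1 ++ [e], acc.2.2)
  else (acc.1, acc.2.1, acc.2.2 ++ [e])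

def solution (A : List Int) : List Int :=
  match A with
  | [] => []
  | _ =>
    let seen := A.foldl (fun s e => if s.contains e then s else s ++ [e]) []
    let r := A.foldl (solStep (PySem.List.pyGet? seen 0) (PySem.List.pyGet? seen 1)) ([], [], [])
    r.1 ++ r.2.1 ++ r.2.2

-- ===== PORT B =====
-- first element of l different from k1 (B's `next((x for x in A if x != k1), None)`)
def findSecond (k1 : Int) : List Int → Option Int
  | [] => none
  | x :: xs => if x ≠ k1 then some x else findSecond k1 xs

def solution_alt (A : List Int) : List Int :=
  match A with
  | [] => []
  | k1 :: _ =>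
    match findSecond k1 A with
    | none => A
    | some k2 =>
      A.filter (fun x => x = k1) ++ A.filter (fun x => x = k2)
        ++ A.filter (fun x => x ≠ k1 ∧ x ≠ k2)

-- ===== PRECONDITION & SPEC =====
def Spec_solution (A : List Int) (out : List Int) : Prop := out = solution_alt A
instance (A : List Int) (out : List Int) : Decidable (Spec_solution A out) := by unfold Spec_solution; infer_instance

-- ===== CLAIM (what is proved, stated in full; the proofs are below) =====
def Claim_equal_solution : Prop := ∀ (A : List Int), Dom_solution A → Spec_solution A (solution A)

-- ===== LEMMAS AND PROOFS =====

-- A's dedup fold only ever appends: the start list is a prefix of the result.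
theorem seen_prefix (l : List Int) (s : List Int) :
    s <+: l.foldl (fun s e => if s.contains e then s else s ++ [e]) s := by
  induction l generalizing s with
  | nil => exact List.prefix_refl s
  | cons x xs ih =>
    simp only [List.foldl_cons]
    refine List.IsPrefix.trans ?_ (ih _)
    split
    · exact List.prefix_refl s
    · exact List.prefix_append s [x]

theorem prefix_getElem? {l₁ l₂ : List Int} (h : l₁ <+: l₂) {i : Nat} (hi : i < l₁.length) :
    l₂[i]? = l₁[i]? := by
  obtain ⟨t, rfl⟩ := h
  simp [List.getElem?_append_left hi]

-- index 0 of the dedup fold starting from [k1]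
theorem seen_zero (l : List Int) (k1 : Int) :
    (l.foldl (fun s e => if s.contains e then s else s ++ [e]) [k1])[0]? = some k1 := by
  rw [prefix_getElem? (seen_prefix l [k1]) (by simp)]
  rfl

-- index 1 of the dedup fold starting from [k1] is exactly B's findSecond
theorem seen_one (l : List Int) (k1 : Int) :
    (l.foldl (fun s e => if s.contains e then s else s ++ [e]) [k1])[1]? = findSecond k1 l := by
  induction l with
  | nil => rfl
  | cons x xs ih =>
    simp only [List.foldl_cons, findSecond]
    by_cases hx : x = k1
    · subst hx
      rw [if_pos (by simp), if_neg (by simp)]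
      exact ih
    · rw [if_neg (by simp [hx]), if_pos hx]
      rw [prefix_getElem? (seen_prefix xs ([k1] ++ [x])) (by simp)]
      rfl

-- findSecond = none means every element equals k1
theorem findSecond_none {k1 : Int} {l : List Int} (h : findSecond k1 l = none) :
    ∀ x ∈ l, x = k1 := by
  induction l with
  | nil => simp
  | cons y ys ih =>
    intro x hx
    by_cases hy : y = k1
    · rcases List.mem_cons.mp hx with rfl | hx
      · exact hy
      · exact ih (by simpa [findSecond, hy] using h) x hx
    · simp [findSecond, hy] at h

theorem findSecond_ne {k1 k2 : Int} {l : List Int} (h : findSecond k1 l = some k2) :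
    k2 ≠ k1 := by
  induction l with
  | nil => simp [findSecond] at h
  | cons y ys ih =>
    by_cases hy : y = k1
    · exact ih (by simpa [findSecond, hy] using h)
    · simp [findSecond, hy] at h; subst h; exact hy

-- A's second loop, characterised as three filters (general accumulator)
theorem pass_filters (seen0 seen1 : Option Int) (l : List Int) (f s t : List Int) :
    l.foldl (solStep seen0 seen1) (f, s, t) =
      (f ++ l.filter (fun e => seen0 = some e),
       s ++ l.filter (fun e => ¬ seen0 = some e ∧ seen1 = some e),
       t ++ l.filter (fun e => ¬ seen0 = some e ∧ ¬ seen1 = some e)) := by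
  induction l generalizing f s t with
  | nil => simp
  | cons x xs ih =>
    simp only [List.foldl_cons, solStep]
    by_cases h0 : seen0 = some x
    · rw [if_pos h0, ih]
      simp [h0]
    · rw [if_neg h0]
      by_cases h1 : seen1 = some x
      · rw [if_pos h1, ih]
        simp [h0, h1]
      · rw [if_neg h1, ih]
        simp [h0, h1]

theorem solution_eq_alt (A : List Int) : solution A = solution_alt A := by
  match A with
  | [] => rfl
  | k1 :: rest =>
    have hstep : (k1 :: rest).foldl (fun s e => if s.contains e then s else s ++ [e]) [] =
        rest.foldl (fun s e => if s.contains e then s else s ++ [e]) [k1] := rfl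
    have h0 : PySem.List.pyGet?
        (rest.foldl (fun s e => if s.contains e then s else s ++ [e]) [k1]) 0 = some k1 := by
      rw [PySem.List.pyGet?_zero]; exact seen_zero rest k1
    have h1 : PySem.List.pyGet?
        (rest.foldl (fun s e => if s.contains e then s else s ++ [e]) [k1]) 1 =
        findSecond k1 rest := by
      rw [(by norm_num : (1:Int) = ((1:Nat):Int)), PySem.List.pyGet?_natCast]
      exact seen_one rest k1
    have hfs : findSecond k1 (k1 :: rest) = findSecond k1 rest := by simp [findSecond]
    simp only [solution, solution_alt, hstep, h0, h1, hfs, pass_filters]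
    rcases hk2 : findSecond k1 rest with _ | k2
    · -- all elements equal k1: A's three lists are (A, [], []), B returns A
      have hall : ∀ x ∈ (k1 :: rest), x = k1 := by
        intro x hx
        rcases List.mem_cons.mp hx with rfl | hx
        · rfl
        · exact findSecond_none hk2 x hx
      simp only [List.nil_append]
      have e1 : (k1 :: rest).filter (fun e => decide (some k1 = some e)) = k1 :: rest := by
        rw [List.filter_eq_self]
        intro a ha; simp [hall a ha]
      have e2 : (k1 :: rest).filter
          (fun e => decide (¬ some k1 = some e ∧ (none : Option Int) = some e)) = [] := by
        simp
      have e3 : (k1 :: rest).filter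
          (fun e => decide (¬ some k1 = some e ∧ ¬ (none : Option Int) = some e)) = [] := by
        rw [List.filter_eq_nil_iff]
        intro a ha; simp [hall a ha]
      rw [e1, e2, e3]
      simp
    · have hne : k2 ≠ k1 := findSecond_ne hk2
      simp only [List.nil_append]
      congr 1
      · congr 1
        · apply List.filter_congr; intro a _
          simp only [decide_eq_decide, Option.some.injEq]
          omega
        · apply List.filter_congr; intro a _
          simp only [decide_eq_decide, Option.some.injEq]
          omega
      · apply List.filter_congr; intro a _
        simp only [decide_eq_decide, Option.some.injEq]
        omega

-- ===== VERDICT (by name: the statement is the Claim_ definition above) =====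
theorem solution_spec : Claim_equal_solution := by
  intro A _
  unfold Spec_solution
  exact solution_eq_alt A
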